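-- pv_equiv track=rewrite | github.com/feisuxiaozhu/gate-complexity | third_order_contractor/check_for_second_order.py | tiny_contractor
-- ===== SOURCE A (Python) =====
-- def tiny_contractor(delta):
--     res=[]
--     dict_res = {}
--     for i in delta:
--         if str(i) in dict_res.keys():
--             dict_res[str(i)] += 1
--         else:
--             dict_res[str(i)] = 1
--     for i,j in dict_res.items():
--         if j == 1:
--             res.append(i)
--
--     return res
-- ===== SOURCE B (Python) =====
-- def tiny_contractor(delta):
--     strs = [str(i) for i in delta]
--     srt = sorted(strs)
--     singles = set()
--     n = len(srt)
--     i = 0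
--     while i < n:
--         j = i + 1
--         while j < n and srt[j] == srt[i]:
--             j += 1
--         if j == i + 1:
--             singles.add(srt[i])
--         i = j
--     return [s for s in strs if s in singles]
-- ===== Notes on version B (the rewrite author's own statement) =====
-- stated objective: alternative
-- what changed: Replaces A's frequency-dict build plus items pass with sort-then-scan: sort the stringified list, walk runs of equal adjacent strings collecting length-1 runs into a set, then filter the original order by set membership.
import Mathlib
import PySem

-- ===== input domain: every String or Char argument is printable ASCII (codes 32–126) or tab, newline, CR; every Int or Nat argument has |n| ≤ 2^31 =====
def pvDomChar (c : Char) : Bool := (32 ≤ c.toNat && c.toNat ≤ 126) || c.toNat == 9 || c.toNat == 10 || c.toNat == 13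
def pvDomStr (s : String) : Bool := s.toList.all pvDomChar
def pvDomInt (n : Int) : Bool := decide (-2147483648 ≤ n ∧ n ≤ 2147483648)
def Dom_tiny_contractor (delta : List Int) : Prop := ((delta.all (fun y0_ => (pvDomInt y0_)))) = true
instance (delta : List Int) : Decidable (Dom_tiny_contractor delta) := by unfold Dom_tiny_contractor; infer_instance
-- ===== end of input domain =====

-- B replaces A's frequency-dict build + items pass with sort-then-scan of runs
-- collecting singleton strings into a set, then a membership filter (alternative, not faster).


-- ===== PORT A =====
-- first loop: builds dict_res, counting occurrences of str(i)
def tiny_contractor_dict (delta : List Int) : PySem.Dict String Int :=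
  delta.foldl (fun d i =>
    let s := PySem.Int.toStr i
    if d.contains s then d.insert s (d.getD s 0 + 1) else d.insert s 1)
    PySem.Dict.empty

def tiny_contractor (delta : List Int) : List String :=
  let dict_res := tiny_contractor_dict delta
  dict_res.items.foldl (fun res ij => if ij.2 == 1 then res ++ [ij.1] else res) []

-- ===== PORT B =====
-- inner while loop of Source B: k counts how many further adjacent elements equal head
def pvRunLen (head : String) : List String → Nat
  | [] => 0
  | x :: xs => if x == head then pvRunLen head xs + 1 else 0

-- outer while loop of Source B: consume one run per iteration; singleton runs go into the set
def pvSingles : List String → PySem.Set String → PySem.Set String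
  | [], acc => acc
  | h :: t, acc =>
    pvSingles (t.drop (pvRunLen h t)) (if pvRunLen h t = 0 then PySem.Set.add acc h else acc)
termination_by l => l.length
decreasing_by
  simp only [List.length_drop, List.length_cons]
  omega

def tiny_contractor_alt (delta : List Int) : List String :=
  let strs := delta.map PySem.Int.toStr
  let singles := pvSingles (PySem.List.sorted strs (fun x => x) false) PySem.Set.empty
  strs.filter (fun s => PySem.Set.contains singles s)

-- ===== PRECONDITION & SPEC =====
def Spec_tiny_contractor (delta : List Int) (out : List String) : Prop := out = tiny_contractor_alt delta
instance (delta : List Int) (out : List String) : Decidable (Spec_tiny_contractor delta out) := by unfold Spec_tiny_contractor; infer_instance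

-- ===== CLAIM (what is proved, stated in full; the proofs are below) =====
def Claim_equal_tiny_contractor : Prop := ∀ (delta : List Int), Dom_tiny_contractor delta → Spec_tiny_contractor delta (tiny_contractor delta)

-- ===== LEMMAS AND PROOFS =====

-- A's first loop is collections-Counter on the mapped strings
lemma tiny_contractor_dict_eq_counter (delta : List Int) :
    tiny_contractor_dict delta = PySem.Dict.counter (delta.map PySem.Int.toStr) := by
  unfold tiny_contractor_dict
  rw [← PySem.Dict.foldl_insert_getD_add_one_eq_counter, List.foldl_map]
  apply PySem.List.foldl_congr_mem
  intro d i _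
  by_cases h : d.contains (PySem.Int.toStr i)
  · simp [h]
  · have hb : d.contains (PySem.Int.toStr i) = false := by simpa using h
    rw [PySem.Dict.getD_of_not_contains (h := hb)]
    simp [h]

-- a count-1 element survives deduplication in place: filtering Set.ofList by
-- "occurs exactly once" equals filtering the original list
lemma filter_count_one_ofList (l : List String) :
    (PySem.Set.ofList l).filter (fun x => l.count x == 1)
      = l.filter (fun x => l.count x == 1) := by
  induction l with
  | nil => rfl
  | cons x xs ih =>
    rw [PySem.Set.ofList_cons]
    by_cases hx : x ∈ xs
    · have h1 : 0 < xs.count x := List.count_pos_iff.mpr hx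
      have hpx : (((x :: xs).count x == 1) : Bool) = false := by
        rw [List.count_cons_self, beq_eq_false_iff_ne]; omega
      simp only [List.filter_cons, hpx, PySem.Set.discard, List.filter_filter]
      have hL : ∀ y ∈ PySem.Set.ofList xs,
          (((x :: xs).count y == 1) && !(y == x)) = (!(y == x) && (xs.count y == 1)) := by
        intro y hy
        by_cases hyx : y = x
        · subst hyx; simp only [hpx, Bool.false_and]; simp
        · have : (x :: xs).count y = xs.count y := by
            rw [List.count_cons]; simp [Ne.symm hyx]
          simp [this, Bool.and_comm]
      have hR : ∀ y ∈ xs,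
          (((x :: xs).count y == 1) : Bool) = (!(y == x) && (xs.count y == 1)) := by
        intro y hy
        by_cases hyx : y = x
        · subst hyx; simp only [hpx]; simp
        · have : (x :: xs).count y = xs.count y := by
            rw [List.count_cons]; simp [Ne.symm hyx]
          simp [this, hyx]
      rw [List.filter_congr hL, List.filter_congr hR,
          ← List.filter_filter, ← List.filter_filter, ih]
    · have hpx : (((x :: xs).count x == 1) : Bool) = true := by
        rw [List.count_cons_self, List.count_eq_zero_of_not_mem hx]; rfl
      simp only [List.filter_cons, hpx, PySem.Set.discard, List.filter_filter]
      have hL : ∀ y ∈ PySem.Set.ofList xs,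
          (((x :: xs).count y == 1) && !(y == x)) = ((xs.count y == 1) : Bool) := by
        intro y hy
        have hyx : y ≠ x := fun h => hx (h ▸ (PySem.Set.mem_ofList _ _).mp hy)
        have : (x :: xs).count y = xs.count y := by
          rw [List.count_cons]; simp [Ne.symm hyx]
        simp [this, hyx]
      have hR : ∀ y ∈ xs,
          (((x :: xs).count y == 1) : Bool) = ((xs.count y == 1) : Bool) := by
        intro y hy
        have hyx : y ≠ x := fun h => hx (h ▸ hy)
        rw [List.count_cons]; simp [Ne.symm hyx]
      rw [List.filter_congr hL, List.filter_congr hR, ih]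

-- A's result, characterised: filter the mapped strings by "occurs exactly once"
lemma tc_A_filter (delta : List Int) :
    tiny_contractor delta
      = (delta.map PySem.Int.toStr).filter
          (fun s => (delta.map PySem.Int.toStr).count s == 1) := by
  unfold tiny_contractor
  simp only []
  rw [tiny_contractor_dict_eq_counter, PySem.Dict.items_counter, List.foldl_map,
      PySem.List.foldl_append_if_eq_filter]
  have hc : ∀ y ∈ PySem.Set.ofList (delta.map PySem.Int.toStr),
      (((((delta.map PySem.Int.toStr).count y : Int)) == 1) : Bool)
        = (((delta.map PySem.Int.toStr).count y == 1) : Bool) := by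
    intro y _
    by_cases h : (delta.map PySem.Int.toStr).count y = 1 <;> simp [h]
  rw [List.filter_congr hc, filter_count_one_ofList]
  simp

-- the inner-loop run length is the length of the maximal equal prefix
lemma pvRunLen_takeWhile (h : String) (t : List String) :
    t.take (pvRunLen h t) = t.takeWhile (fun x => x == h)
      ∧ t.drop (pvRunLen h t) = t.dropWhile (fun x => x == h) := by
  induction t with
  | nil => exact ⟨rfl, rfl⟩
  | cons x xs ih =>
    by_cases hx : x = h
    · subst hx
      simp only [pvRunLen, beq_self_eq_true, if_true, List.take_succ_cons,
        List.drop_succ_cons, List.takeWhile_cons, List.dropWhile_cons, ih.1, ih.2]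
      simp
    · simp [pvRunLen, hx]

lemma head_ne_of_dropWhile_beq (h : String) :
    ∀ (t y : List String) (z : String), t.dropWhile (fun x => x == h) = z :: y → z ≠ h := by
  intro t
  induction t with
  | nil => intro y z hz; cases hz
  | cons x xs ih =>
    intro y z hz
    by_cases hx : x = h
    · subst hx; rw [List.dropWhile_cons_of_pos (by simp)] at hz; exact ih y z hz
    · rw [List.dropWhile_cons_of_neg (by simp [hx])] at hz
      cases hz; exact hx

lemma pvRunLen_le (h : String) : ∀ t : List String, pvRunLen h t ≤ t.length
  | [] => Nat.le_refl 0
  | x :: xs => by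
    by_cases hx : x = h
    · have := pvRunLen_le h xs
      simp only [pvRunLen, hx, beq_self_eq_true, if_true, List.length_cons]
      omega
    · simp [pvRunLen, hx]

-- the outer loop collects exactly the strings of count 1 (on a sorted list)
lemma mem_pvSingles :
    ∀ (l : List String) (acc : PySem.Set String), l.Pairwise (· ≤ ·) →
      ∀ x, (x ∈ pvSingles l acc ↔ x ∈ acc ∨ l.count x = 1)
  | [], acc => by intro _ x; simp [pvSingles]
  | h :: t, acc => by
    intro hp x
    have hpt : t.Pairwise (· ≤ ·) := hp.of_cons
    have hpr : (t.drop (pvRunLen h t)).Pairwise (· ≤ ·) := hpt.drop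
    have ih := mem_pvSingles (t.drop (pvRunLen h t))
      (if pvRunLen h t = 0 then PySem.Set.add acc h else acc) hpr x
    -- h does not occur in the remainder of the list
    have hnot : h ∉ t.drop (pvRunLen h t) := by
      rw [(pvRunLen_takeWhile h t).2]
      intro hmem
      cases hd : t.dropWhile (fun w => w == h) with
      | nil => rw [hd] at hmem; cases hmem
      | cons z y =>
        have hzne : z ≠ h := head_ne_of_dropWhile_beq h t y z hd
        rw [hd] at hmem
        have hdp : (z :: y).Pairwise (· ≤ ·) := by
          rw [← hd, ← (pvRunLen_takeWhile h t).2]; exact hpr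
        have hzh : z ≤ h := by
          rcases List.mem_cons.mp hmem with rfl | hm
          · exact le_refl _
          · exact (List.pairwise_cons.mp hdp).1 h hm
        have hhz : h ≤ z := by
          have hzt : z ∈ t := (List.dropWhile_sublist _).subset
            (by rw [hd]; exact List.mem_cons_self)
          exact (List.pairwise_cons.mp hp).1 z hzt
        exact hzne (le_antisymm hzh hhz)
    have hsplit : t = t.take (pvRunLen h t) ++ t.drop (pvRunLen h t) :=
      (List.take_append_drop _ t).symm
    have htake : ∀ w ∈ t.take (pvRunLen h t), w = h := by
      rw [(pvRunLen_takeWhile h t).1]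
      intro w hw
      simpa using List.mem_takeWhile_imp hw
    rw [pvSingles, ih]
    by_cases hx : x = h
    · subst hx
      have hcr : (t.drop (pvRunLen x t)).count x = 0 := List.count_eq_zero_of_not_mem hnot
      have hct : (t.take (pvRunLen x t)).count x = pvRunLen x t := by
        rw [List.count_eq_length.mpr (fun b hb => (htake b hb).symm),
            List.length_take, Nat.min_eq_left (pvRunLen_le x t)]
      have hcount : (x :: t).count x = pvRunLen x t + 1 := by
        rw [List.count_cons_self]
        conv_lhs => rw [hsplit]
        rw [List.count_append, hct, hcr]
      rw [hcount, hcr]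
      by_cases hk : pvRunLen x t = 0
      · simp [hk, PySem.Set.mem_add]
      · simp [hk]
    · have hctx : (t.take (pvRunLen h t)).count x = 0 :=
        List.count_eq_zero_of_not_mem (fun hm => hx (htake x hm))
      have hch : List.count x (h :: t) = List.count x t := by
        simp [Ne.symm hx]
      have hcount : List.count x (h :: t) = List.count x (t.drop (pvRunLen h t)) := by
        rw [hch]
        conv_lhs => rw [hsplit]
        rw [List.count_append, hctx]
        omega
      rw [hcount]
      by_cases hk : pvRunLen h t = 0
      · simp only [hk, if_true]
        rw [PySem.Set.mem_add]
        constructor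
        · rintro (⟨hm | hm⟩ | hc)
          · exact Or.inl hm
          · exact absurd hm hx
          · exact Or.inr hc
        · rintro (hm | hc)
          · exact Or.inl (Or.inl hm)
          · exact Or.inr hc
      · simp [hk]
termination_by l => l.length
decreasing_by
  simp only [List.length_drop, List.length_cons]
  omega

lemma tc_key (delta : List Int) :
    tiny_contractor delta = tiny_contractor_alt delta := by
  unfold tiny_contractor_alt
  simp only []
  rw [tc_A_filter]
  apply (List.filter_congr _).symm
  intro s _
  set strs := delta.map PySem.Int.toStr with hstrs
  have hperm : (PySem.List.sorted strs (fun x => x) false).Perm strs :=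
    PySem.List.sorted_perm strs (fun x => x) false
  have hpair : (PySem.List.sorted strs (fun x => x) false).Pairwise (· ≤ ·) :=
    PySem.List.sorted_pairwise strs (fun x => x)
  have hm := mem_pvSingles (PySem.List.sorted strs (fun x => x) false) PySem.Set.empty hpair s
  have hcc : (PySem.List.sorted strs (fun x => x) false).count s = strs.count s := hperm.count_eq s
  by_cases hc : strs.count s = 1
  · have : s ∈ pvSingles (PySem.List.sorted strs (fun x => x) false) PySem.Set.empty := by
      rw [hm, hcc]; exact Or.inr hc
    rw [(PySem.Set.contains_iff _ _).mpr this]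
    simp [hc]
  · have : s ∉ pvSingles (PySem.List.sorted strs (fun x => x) false) PySem.Set.empty := by
      rw [hm, hcc]
      rintro (habs | habs)
      · cases habs
      · exact hc habs
    have hfalse : PySem.Set.contains (pvSingles (PySem.List.sorted strs (fun x => x) false) PySem.Set.empty) s = false := by
      by_contra habs
      exact this ((PySem.Set.contains_iff _ _).mp (by simpa using habs))
    rw [hfalse]
    simp [hc]

-- ===== VERDICT (by name: the statement is the Claim_ definition above) =====
theorem tiny_contractor_spec : Claim_equal_tiny_contractor := by
  intro delta _
  exact tc_key delta
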